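-- pv_equiv track=rewrite | github.com/nicolasgorrity/advent_of_code | 2020/ex18/ex.py | index_operator
-- ===== SOURCE A (Python) =====
-- from itertools import takewhile
-- from typing import Sequence, Tuple, Callable, Optional, Iterator, Iterable
--
-- def index_operator(expr: str,
--                    operators: Optional[Iterator[str]] = None
--                    ) -> Optional[Tuple[int, int]]:
--     if not operators:
--         operators = {'+', '-', '*', '/'}
--
--     start_idx = sum(1 for _ in takewhile(
--         lambda char:
--         str.isspace(char) or char not in operators,
--         expr))
--
--     if start_idx == len(expr):
--         return None
--
--     if start_idx == len(expr) - 1: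
--         return start_idx, start_idx
--
--     end_idx = start_idx + sum(1 for _ in takewhile(lambda char:
--                                                    char in operators,
--                                                    expr[start_idx + 1:]))
--
--     return start_idx, end_idx
-- ===== SOURCE B (Python) =====
-- def index_operator(expr, operators=None):
--     ops = set(operators) if operators else {'+', '-', '*', '/'}
--     start = end = None
--     for i, ch in enumerate(expr):
--         if start is None:
--             if ch in ops and not ch.isspace():
--                 start = end = i
--         elif ch in ops:
--             end = i
--         else:
--             break
--     return None if start is None else (start, end)
-- ===== Notes on version B (the rewrite author's own statement) =====
-- stated objective: simpler
-- what changed: Replaces A's two separate takewhile counting scans plus slicing and a special length-1 branch with a single state-machine pass over enumerate(expr) that records the start and last index of the first operator run and breaks early.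
import Mathlib
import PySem

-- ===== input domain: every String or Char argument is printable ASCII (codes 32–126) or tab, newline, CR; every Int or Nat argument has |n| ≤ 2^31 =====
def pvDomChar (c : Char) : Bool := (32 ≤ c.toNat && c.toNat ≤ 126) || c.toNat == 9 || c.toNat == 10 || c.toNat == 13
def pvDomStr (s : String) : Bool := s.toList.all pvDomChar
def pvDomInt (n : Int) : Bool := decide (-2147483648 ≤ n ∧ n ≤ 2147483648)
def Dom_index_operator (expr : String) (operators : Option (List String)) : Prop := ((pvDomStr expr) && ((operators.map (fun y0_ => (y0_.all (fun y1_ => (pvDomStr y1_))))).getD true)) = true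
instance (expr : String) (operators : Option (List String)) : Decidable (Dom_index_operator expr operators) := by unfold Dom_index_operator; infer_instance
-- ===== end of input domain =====

-- B replaces A's two takewhile counting scans (+ slicing and a length-1 special case) by a
-- single state-machine pass that records the start and last index of the first operator run.

-- ===== PORT A =====
-- 'if not operators: operators = {...}' (None or empty list is falsy)
def pvResolveOps (operators : Option (List String)) : List String :=
  match operators with
  | none => ["+", "-", "*", "/"]
  | some l => if l = [] then ["+", "-", "*", "/"] else l

-- 'char in operators' for a single character (membership of the 1-char string)
def pvOpMem (ops : List String) (c : Char) : Bool := ops.contains (String.ofList [c])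

def index_operator (expr : String) (operators : Option (List String)) : Option (Int × Int) :=
  let ops := pvResolveOps operators
  let cs := expr.toList
  let start_idx : Int :=
    (cs.takeWhile (fun c => PySem.Chars.isspace c || !pvOpMem ops c)).length
  if start_idx = (cs.length : Int) then none
  else if start_idx = (cs.length : Int) - 1 then some (start_idx, start_idx)
  else
    -- expr[start_idx + 1:] with a nonnegative index is drop
    let tail := cs.drop (start_idx.toNat + 1)
    let end_idx : Int := start_idx + (tail.takeWhile (fun c => pvOpMem ops c)).length
    some (start_idx, end_idx)

-- ===== PORT B =====
-- the single loop of Source B: state none = start not found, some (s, e) = run [s, e] so far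
def pvLoopB (ops : List String) : List Char → Nat → Option (Nat × Nat) → Option (Nat × Nat)
  | [], _, st => st
  | c :: rest, i, none =>
      if pvOpMem ops c && !PySem.Chars.isspace c then
        pvLoopB ops rest (i + 1) (some (i, i))
      else
        pvLoopB ops rest (i + 1) none
  | c :: rest, i, some (s, e) =>
      if pvOpMem ops c then pvLoopB ops rest (i + 1) (some (s, i))
      else some (s, e)   -- break

def index_operator_alt (expr : String) (operators : Option (List String)) : Option (Int × Int) :=
  let ops := pvResolveOps operators
  (pvLoopB ops expr.toList 0 none).map (fun p => ((p.1 : Int), (p.2 : Int)))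

-- ===== PRECONDITION & SPEC =====
def Spec_index_operator (expr : String) (operators : Option (List String)) (out : Option (Int × Int)) : Prop := out = index_operator_alt expr operators
instance (expr : String) (operators : Option (List String)) (out : Option (Int × Int)) : Decidable (Spec_index_operator expr operators out) := by unfold Spec_index_operator; infer_instance

-- ===== CLAIM (what is proved, stated in full; the proofs are below) =====
def Claim_equal_index_operator : Prop := ∀ (expr : String) (operators : Option (List String)), Dom_index_operator expr operators → Spec_index_operator expr operators (index_operator expr operators)

-- ===== LEMMAS AND PROOFS =====

-- extension phase: with state some (s, i), the loop adds the length of the operator run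
theorem pvLoopB_some (ops : List String) (cs : List Char) :
    ∀ (i s : Nat), pvLoopB ops cs (i + 1) (some (s, i)) =
      some (s, i + (cs.takeWhile (fun c => pvOpMem ops c)).length) := by
  induction cs with
  | nil => intro i s; simp [pvLoopB]
  | cons c rest ih =>
    intro i s
    by_cases h : pvOpMem ops c
    · simp [pvLoopB, h, List.takeWhile, ih (i + 1) s]
      omega
    · simp [pvLoopB, h, List.takeWhile]

-- search phase: running from state none is A's computation
theorem pvLoopB_none (ops : List String) (cs : List Char) :
    ∀ (i : Nat),
      pvLoopB ops cs i none =
        (if (cs.takeWhile (fun c => PySem.Chars.isspace c || !pvOpMem ops c)).length = cs.length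
         then none
         else
           let s := (cs.takeWhile (fun c => PySem.Chars.isspace c || !pvOpMem ops c)).length
           some (i + s, i + s +
             ((cs.drop (s + 1)).takeWhile (fun c => pvOpMem ops c)).length)) := by
  induction cs with
  | nil => intro i; simp [pvLoopB]
  | cons c rest ih =>
    intro i
    by_cases h : (PySem.Chars.isspace c || !pvOpMem ops c) = true
    · have hmem : ¬ (pvOpMem ops c && !PySem.Chars.isspace c) = true := by
        cases hs : PySem.Chars.isspace c <;> cases hm : pvOpMem ops c <;> simp_all
      simp only [pvLoopB, List.takeWhile, h]
      rw [if_neg hmem, ih (i + 1)]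
      simp only [List.length_cons]
      by_cases hlen : (rest.takeWhile (fun c => PySem.Chars.isspace c || !pvOpMem ops c)).length = rest.length
      · simp [hlen]
      · have hne : ¬ ((rest.takeWhile (fun c => PySem.Chars.isspace c || !pvOpMem ops c)).length + 1 = rest.length + 1) := by omega
        simp only [hlen, hne, if_false]
        have : (rest.takeWhile (fun c => PySem.Chars.isspace c || !pvOpMem ops c)).length + 1 + 1
            = (rest.takeWhile (fun c => PySem.Chars.isspace c || !pvOpMem ops c)).length + 2 := by omega
        simp [this, List.drop_succ_cons]
        omega
    · have hmem : (pvOpMem ops c && !PySem.Chars.isspace c) = true := by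
        cases hs : PySem.Chars.isspace c <;> cases hm : pvOpMem ops c <;> simp_all
      simp only [pvLoopB, List.takeWhile, h, if_pos hmem]
      rw [pvLoopB_some]
      have hlen : ¬ (0 = rest.length + 1) := by omega
      simp

-- the two formulations agree, for any ops and character list
theorem pvKey (ops : List String) (cs : List Char) :
    (if ((cs.takeWhile (fun c => PySem.Chars.isspace c || !pvOpMem ops c)).length : Int) = (cs.length : Int) then none
     else if ((cs.takeWhile (fun c => PySem.Chars.isspace c || !pvOpMem ops c)).length : Int) = (cs.length : Int) - 1 then
       some (((cs.takeWhile (fun c => PySem.Chars.isspace c || !pvOpMem ops c)).length : Int),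
             ((cs.takeWhile (fun c => PySem.Chars.isspace c || !pvOpMem ops c)).length : Int))
     else
       some (((cs.takeWhile (fun c => PySem.Chars.isspace c || !pvOpMem ops c)).length : Int),
             ((cs.takeWhile (fun c => PySem.Chars.isspace c || !pvOpMem ops c)).length : Int) +
               (((cs.drop ((((cs.takeWhile (fun c => PySem.Chars.isspace c || !pvOpMem ops c)).length : Int)).toNat + 1)).takeWhile
                   (fun c => pvOpMem ops c)).length : Int)))
    = (pvLoopB ops cs 0 none).map (fun p => ((p.1 : Int), (p.2 : Int))) := by
  rw [pvLoopB_none]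
  set s := (cs.takeWhile (fun c => PySem.Chars.isspace c || !pvOpMem ops c)).length with hs
  have hsle : s ≤ cs.length := by
    simpa [hs] using
      (List.takeWhile_sublist (p := fun c => PySem.Chars.isspace c || !pvOpMem ops c) (l := cs)).length_le
  by_cases h1 : (s : Int) = (cs.length : Int)
  · have : s = cs.length := by exact_mod_cast h1
    simp [this]
  · have hslt : s < cs.length := by
      have : s ≠ cs.length := fun hc => h1 (by exact_mod_cast hc)
      omega
    have hne : ¬ s = cs.length := by omega
    simp only [if_neg h1, if_neg hne]
    by_cases h2 : (s : Int) = (cs.length : Int) - 1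
    · have hd2 : List.drop (s + 1) cs = [] := List.drop_eq_nil_of_le (by omega)
      rw [if_pos h2, hd2]
      simp
    · have htn : ((s : Int)).toNat = s := Int.toNat_natCast s
      simp only [if_neg h2, htn, Option.map_some]
      push_cast
      ring_nf

-- ===== VERDICT (by name: the statement is the Claim_ definition above) =====
theorem index_operator_spec : Claim_equal_index_operator := by
  intro expr operators _
  unfold Spec_index_operator index_operator index_operator_alt
  exact pvKey (pvResolveOps operators) expr.toList
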